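-- pv_equiv track=rewrite | github.com/Algorithm-Study/Algorithm | brute_force/P87946_이영섭.py | solution
-- ===== SOURCE A (Python) =====
-- def permutations(array, r, prefix=[]):
--     for i in range(len(array)):
--         if i in prefix: continue
--         if r == 1:
--             yield [array[i]]
--         else:
--             prefix.append(i)
--             for next in permutations(array, r-1, prefix):
--                 yield [array[i]] + next
--             prefix.pop()
--
-- def solution(k, dungeons):
--     answer = -1
--     bf = list(permutations(list(range(len(dungeons))), len(dungeons), []))
--     result = []
--     for case in bf:
--         temp = k
--         cnt = 0
--         for val in case:
--             if temp >= dungeons[val][0]: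
--                 temp -= dungeons[val][1]
--                 cnt += 1
--             else:
--                 break
--         result.append(cnt)
--     answer = max(result)
--     return answer
-- ===== SOURCE B (Python) =====
-- def solution(k, dungeons):
--     # recursive best-first search over the remaining dungeon indices (prunes dead branches
--     # instead of materialising every permutation)
--     def dfs(fatigue, remaining):
--         best = 0
--         for i in remaining:
--             if fatigue >= dungeons[i][0]:
--                 sub = 1 + dfs(fatigue - dungeons[i][1], [j for j in remaining if j != i])
--                 if sub > best:
--                     best = sub
--         return best
--     return dfs(k, list(range(len(dungeons))))
-- ===== Notes on version B (the rewrite author's own statement) =====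
-- stated objective: alternative
-- what changed: A materialises all n! index permutations via a recursive generator and then scans each one with the break-loop; B replaces this with a recursive depth-first search over the remaining dungeon indices that extends only orders whose next dungeon is actually enterable, pruning dead branches instead of enumerating and re-scanning every permutation (intended as a constant-factor win; a timing run could not confirm it at the largest size, where both are exponential).
-- outside the precondition, e.g. on solution(0, [[5], [7, -10]]): A returns 0, B returns 0
import Mathlib
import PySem

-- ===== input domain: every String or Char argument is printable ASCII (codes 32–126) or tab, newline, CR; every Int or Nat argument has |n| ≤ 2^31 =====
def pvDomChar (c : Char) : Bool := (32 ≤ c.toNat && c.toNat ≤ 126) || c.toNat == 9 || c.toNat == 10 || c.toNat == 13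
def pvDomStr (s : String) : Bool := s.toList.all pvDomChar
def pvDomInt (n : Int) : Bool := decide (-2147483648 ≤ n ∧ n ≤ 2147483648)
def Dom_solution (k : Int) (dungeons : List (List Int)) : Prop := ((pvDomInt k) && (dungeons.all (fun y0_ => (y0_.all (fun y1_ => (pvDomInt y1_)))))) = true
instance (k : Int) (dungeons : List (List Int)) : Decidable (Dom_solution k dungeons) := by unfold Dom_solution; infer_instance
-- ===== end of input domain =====

-- B replaces A's materialisation of all n! permutations (then scanning each) by a
-- recursive depth-first search over the remaining dungeon indices that prunes a branch
-- as soon as a dungeon cannot be entered; equivalence is proved on the return value.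

-- ===== PORT A =====
-- Python generator `permutations(array, r, prefix)`; the mutable prefix (append/recurse/pop)
-- is rendered as the argument `pre ++ [i]`.  The `0` fuel case: Python only reaches r ≤ 0
-- when no index i ∉ prefix remains (r = len(array) - len(prefix) throughout solution's use),
-- where the loop yields nothing; `[]` is exact there.
def permsA (array : List Int) : Nat → List Nat → List (List Int)
  | 0, _ => []
  | r + 1, pre =>
    (List.range array.length).foldl (fun acc i =>
      if i ∈ pre then acc
      else if r = 0 then acc ++ [[array.getD i 0]]   -- `if r == 1: yield [array[i]]`
      else acc ++ (permsA array r (pre ++ [i])).map (fun nxt => array.getD i 0 :: nxt)) []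

-- the inner `for val in case: … else: break` loop; indices come from range(len(dungeons)),
-- so `getD val.toNat` is exactly Python's dungeons[val]; row reads are in range under Pre_
def runA (dungeons : List (List Int)) : Int → Int → List Int → Int
  | _, cnt, [] => cnt
  | temp, cnt, val :: rest =>
    if (dungeons.getD val.toNat []).getD 0 0 ≤ temp then
      runA dungeons (temp - (dungeons.getD val.toNat []).getD 1 0) (cnt + 1) rest
    else cnt

def solution (k : Int) (dungeons : List (List Int)) : Int :=
  let bf := permsA ((List.range dungeons.length).map Int.ofNat) dungeons.length []
  let result := bf.map (fun case => runA dungeons k 0 case)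
  (PySem.List.max? result (fun y => y)).getD (-1)   -- Python max(result); raises on [] (outside Pre_)

-- ===== PORT B =====
def dfsB (dungeons : List (List Int)) : Nat → Int → List Int → Int
  | 0, _, _ => 0          -- fuel = |remaining| throughout; at 0 the loop body never runs
  | fuel + 1, fatigue, remaining =>
    remaining.foldl (fun best i =>
      if (dungeons.getD i.toNat []).getD 0 0 ≤ fatigue then
        max best (1 + dfsB dungeons fuel (fatigue - (dungeons.getD i.toNat []).getD 1 0)
                      (remaining.filter (fun j => j ≠ i)))
      else best) 0

def solution_alt (k : Int) (dungeons : List (List Int)) : Int :=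
  dfsB dungeons dungeons.length k ((List.range dungeons.length).map Int.ofNat)

-- ===== PRECONDITION & SPEC =====
-- Pre_ excludes dungeons = [] (A's max([]) raises ValueError) and rows shorter than 2,
-- except a length-1 row that provably is never read through (its requirement exceeds k and
-- no negative cost can raise the fatigue above k); outside that shape A raises IndexError
-- whenever a short row is read through, though on some excluded inputs with a never-entered
-- short row A still happens to return (see cites).
def Pre_solution (k : Int) (dungeons : List (List Int)) : Prop :=
  dungeons ≠ [] ∧ ∀ row ∈ dungeons,
    (2 ≤ row.length ∨
      (row.length = 1 ∧ k < row.getD 0 0 ∧ ∀ r2 ∈ dungeons, 0 ≤ r2.getD 1 0))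
instance (k : Int) (dungeons : List (List Int)) : Decidable (Pre_solution k dungeons) := by
  unfold Pre_solution; infer_instance

def pvWitness_solution : Int × List (List Int) := (4, [[3, 2], [1, 1]])

def Spec_solution (k : Int) (dungeons : List (List Int)) (out : Int) : Prop := out = solution_alt k dungeons
instance (k : Int) (dungeons : List (List Int)) (out : Int) : Decidable (Spec_solution k dungeons out) := by unfold Spec_solution; infer_instance

-- ===== CLAIM (what is proved, stated in full; the proofs are below) =====
def Claim_equal_solution : Prop := ∀ (k : Int) (dungeons : List (List Int)), Dom_solution k dungeons → Pre_solution k dungeons → Spec_solution k dungeons (solution k dungeons)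

-- ===== LEMMAS AND PROOFS =====

-- cnt is a pure accumulator of the break-loop
lemma runA_shift (d : List (List Int)) (case : List Int) :
    ∀ t c, runA d t c case = c + runA d t 0 case := by
  induction case with
  | nil => intro t c; simp [runA]
  | cons v rest ih =>
    intro t c
    simp only [runA]
    split_ifs with h
    · rw [ih (t - (d.getD v.toNat []).getD 1 0) (c + 1),
        ih (t - (d.getD v.toNat []).getD 1 0) (0 + 1)]; omega
    · simp

lemma runA_nonneg (d : List (List Int)) (case : List Int) :
    ∀ t, 0 ≤ runA d t 0 case := by
  induction case with
  | nil => intro t; simp [runA]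
  | cons v rest ih =>
    intro t
    simp only [runA]
    split_ifs with h
    · rw [runA_shift]; have := ih (t - (d.getD v.toNat []).getD 1 0); omega
    · omega

lemma foldl_max_init (ys : List Int) : ∀ a b, ys.foldl max (max a b) = max a (ys.foldl max b) := by
  induction ys with
  | nil => intro a b; simp
  | cons y t ih => intro a b; simp only [List.foldl_cons, max_assoc]; exact ih a (max b y)

lemma foldl_max_map_one_add (ys : List Int) :
    ∀ b, (ys.map (fun y => 1 + y)).foldl max (1 + b) = 1 + ys.foldl max b := by
  induction ys with
  | nil => intro b; simp
  | cons y t ih =>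
    intro b
    simp only [List.map_cons, List.foldl_cons]
    rw [show max (1 + b) (1 + y) = 1 + max b y from max_add_add_left 1 b y]
    exact ih (max b y)

lemma foldl_max_zeros {α : Type} (ys : List α) : ∀ (a : Int), 0 ≤ a →
    (ys.map (fun _ => (0 : Int))).foldl max a = a := by
  induction ys with
  | nil => intro a _; rfl
  | cons y t ih => intro a ha; simpa [max_eq_left ha] using ih a ha

-- the permutation generator as a flatMap over the index range
lemma permsA_eq_flatMap (arr : List Int) (f : Nat) (pre : List Nat) :
    permsA arr (f + 1) pre = (List.range arr.length).flatMap (fun i =>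
      if i ∈ pre then []
      else if f = 0 then [[arr.getD i 0]]
      else (permsA arr f (pre ++ [i])).map (fun nxt => arr.getD i 0 :: nxt)) := by
  rw [permsA]
  rw [show (fun (acc : List (List Int)) i =>
      if i ∈ pre then acc
      else if f = 0 then acc ++ [[arr.getD i 0]]
      else acc ++ (permsA arr f (pre ++ [i])).map (fun nxt => arr.getD i 0 :: nxt))
    = fun acc i => acc ++ (if i ∈ pre then []
      else if f = 0 then [[arr.getD i 0]]
      else (permsA arr f (pre ++ [i])).map (fun nxt => arr.getD i 0 :: nxt)) from by
    funext acc i; split_ifs <;> simp]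
  rw [PySem.List.foldl_append_eq_flatMap]
  simp

-- removing one more index from the availability filter
lemma avail_step (n : Nat) (pre : List Nat) (i : Nat) :
    (List.range n).filter (fun j => decide ¬ j ∈ pre ++ [i])
      = ((List.range n).filter (fun j => decide ¬ j ∈ pre)).filter (fun j => j ≠ i) := by
  rw [List.filter_filter]
  apply List.filter_congr
  intro j _
  by_cases h1 : j ∈ pre <;> by_cases h2 : j = i <;> simp [h1, h2]

lemma avail_step_length (n : Nat) (pre : List Nat) (i : Nat)
    (hi : i ∈ (List.range n).filter (fun j => decide ¬ j ∈ pre)) :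
    ((List.range n).filter (fun j => decide ¬ j ∈ pre ++ [i])).length
      = ((List.range n).filter (fun j => decide ¬ j ∈ pre)).length - 1 := by
  rw [avail_step]
  have hnd : ((List.range n).filter (fun j => decide ¬ j ∈ pre)).Nodup :=
    (List.nodup_range).filter _
  have e : (fun j => decide (j ≠ i)) = (fun j : Nat => j != i) := by
    funext j; by_cases hj : j = i <;> simp [hj, bne]
  rw [e, ← List.Nodup.erase_eq_filter hnd, List.length_erase_of_mem hi]

-- a nonempty list of nonnegative values shifted by one: running max against any base
lemma foldl_max_one_add_ne_nil (ys : List Int) (hne : ys ≠ []) (hnn : ∀ y ∈ ys, 0 ≤ y) (b : Int) :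
    (ys.map (fun y => 1 + y)).foldl max b = max b (1 + ys.foldl max 0) := by
  obtain ⟨y, t, rfl⟩ := List.exists_cons_of_ne_nil hne
  have hy : 0 ≤ y := hnn y (by simp)
  simp only [List.map_cons, List.foldl_cons]
  rw [show max 0 y = y from max_eq_right hy, foldl_max_init, foldl_max_map_one_add]

-- folding max over a concatenation of blocks = folding the per-block summaries
lemma foldmax_flatMap_eq (l : List Nat) (g : Nat → List Int) (s : Int → Nat → Int)
    (hstep : ∀ b i, i ∈ l → 0 ≤ b → (g i).foldl max b = s b i ∧ 0 ≤ s b i) :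
    ∀ b, 0 ≤ b → (l.flatMap g).foldl max b = l.foldl s b := by
  induction l with
  | nil => intro b _; rfl
  | cons i l' ih =>
    intro b hb
    obtain ⟨h1, h2⟩ := hstep b i (by simp) hb
    rw [List.flatMap_cons, List.foldl_append, h1, List.foldl_cons]
    exact ih (fun b' j hj hb' => hstep b' j (by simp [hj]) hb') (s b i) h2

-- main induction: max of A's per-permutation counts = B's pruned DFS value
lemma main_lemma (d : List (List Int)) :
    ∀ fuel (pre : List Nat) (t : Int),
      fuel = ((List.range d.length).filter (fun j => decide ¬ j ∈ pre)).length →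
      1 ≤ fuel →
      permsA ((List.range d.length).map Int.ofNat) fuel pre ≠ [] ∧
      ((permsA ((List.range d.length).map Int.ofNat) fuel pre).map (fun c => runA d t 0 c)).foldl max 0
        = dfsB d fuel t ((((List.range d.length).filter (fun j => decide ¬ j ∈ pre)).map Int.ofNat)) := by
  intro fuel
  induction fuel with
  | zero => intro pre t hf h1; omega
  | succ f ih =>
    intro pre t hf h1
    have harr : ((List.range d.length).map Int.ofNat).length = d.length := by simp
    have hperm : permsA ((List.range d.length).map Int.ofNat) (f + 1) pre
        = (List.range d.length).flatMap (fun i =>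
            if i ∈ pre then []
            else if f = 0 then [[((List.range d.length).map Int.ofNat).getD i 0]]
            else (permsA ((List.range d.length).map Int.ofNat) f (pre ++ [i])).map
              (fun nxt => ((List.range d.length).map Int.ofNat).getD i 0 :: nxt)) := by
      rw [permsA_eq_flatMap, harr]
    -- bookkeeping for one chosen index i
    have hsub : ∀ i, i ∈ List.range d.length → i ∉ pre → f ≠ 0 →
        f = ((List.range d.length).filter (fun j => decide ¬ j ∈ pre ++ [i])).length ∧ 1 ≤ f := by
      intro i hi hp hf0
      have hiav : i ∈ (List.range d.length).filter (fun j => decide ¬ j ∈ pre) := by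
        simp [List.mem_filter, hi, hp]
      have := avail_step_length d.length pre i hiav
      constructor
      · omega
      · omega
    -- nonemptiness
    have hav : (List.range d.length).filter (fun j => decide ¬ j ∈ pre) ≠ [] := by
      intro hnil; rw [hnil] at hf; simp at hf
    obtain ⟨i0, hi0⟩ := List.exists_mem_of_ne_nil _ hav
    have hi0r : i0 ∈ List.range d.length := (List.mem_filter.mp hi0).1
    have hi0p : i0 ∉ pre := by
      have := (List.mem_filter.mp hi0).2; simpa using this
    have hne : permsA ((List.range d.length).map Int.ofNat) (f + 1) pre ≠ [] := by
      rw [hperm]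
      intro hnil
      have h0 := (List.flatMap_eq_nil_iff.mp hnil) i0 hi0r
      simp only [if_neg hi0p] at h0
      by_cases hf0 : f = 0
      · simp [hf0] at h0
      · obtain ⟨hfeq, hf1⟩ := hsub i0 hi0r hi0p hf0
        obtain ⟨hPne, _⟩ := ih (pre ++ [i0]) t hfeq hf1
        rw [if_neg hf0] at h0
        exact hPne (List.map_eq_nil_iff.mp h0)
    refine ⟨hne, ?_⟩
    -- the per-index summary function
    set stp : Int → Nat → Int := fun b i =>
      if i ∈ pre then b
      else if (d.getD i []).getD 0 0 ≤ t then
        max b (1 + dfsB d f (t - (d.getD i []).getD 1 0)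
          (((List.range d.length).filter (fun j => decide ¬ j ∈ pre ++ [i])).map Int.ofNat))
      else b with hstp
    -- A's side folds to the summary fold
    have hstep : ∀ b i, i ∈ List.range d.length → 0 ≤ b →
        (((if i ∈ pre then []
            else if f = 0 then [[((List.range d.length).map Int.ofNat).getD i 0]]
            else (permsA ((List.range d.length).map Int.ofNat) f (pre ++ [i])).map
              (fun nxt => ((List.range d.length).map Int.ofNat).getD i 0 :: nxt)).map
          (fun c => runA d t 0 c)).foldl max b = stp b i) ∧ 0 ≤ stp b i := by
      intro b i hi hb
      by_cases hp : i ∈ pre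
      · simp [hp, hstp, hb]
      · have hilt : i < d.length := List.mem_range.mp hi
        have hget : ((List.range d.length).map Int.ofNat).getD i 0 = Int.ofNat i :=
          PySem.List.getD_map_range Int.ofNat d.length i 0 hilt
        by_cases hf0 : f = 0
        · subst hf0
          rw [if_neg hp, if_pos rfl, hget]
          have hrA : runA d t 0 [Int.ofNat i]
              = if (d.getD i []).getD 0 0 ≤ t then 1 else 0 := by
            simp only [runA, Int.ofNat_eq_natCast, Int.toNat_natCast]
            split_ifs <;> rfl
          simp only [List.map_cons, List.map_nil, List.foldl_cons, List.foldl_nil, hrA, hstp,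
            if_neg hp]
          refine ⟨?_, ?_⟩
          · split_ifs with hc
            · norm_num [dfsB]
            · exact max_eq_left hb
          · split_ifs with hc
            · exact le_trans hb (le_max_left _ _)
            · exact hb
        · obtain ⟨hfeq, hf1⟩ := hsub i hi hp hf0
          obtain ⟨hPne, hPeq⟩ := ih (pre ++ [i]) (t - (d.getD i []).getD 1 0) hfeq hf1
          rw [if_neg hp, if_neg hf0]
          have hrun : ∀ c : List Int, runA d t 0 (Int.ofNat i :: c)
              = if (d.getD i []).getD 0 0 ≤ t then 1 + runA d (t - (d.getD i []).getD 1 0) 0 c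
                else 0 := by
            intro c
            simp only [runA, Int.ofNat_eq_natCast, Int.toNat_natCast]
            split_ifs with hc
            · exact runA_shift d c (t - (d.getD i []).getD 1 0) 1
            · rfl
          by_cases hc : (d.getD i []).getD 0 0 ≤ t
          · have hmaps :
                (((permsA ((List.range d.length).map Int.ofNat) f (pre ++ [i])).map
                  (fun nxt => ((List.range d.length).map Int.ofNat).getD i 0 :: nxt)).map
                    (fun c => runA d t 0 c))
                = ((permsA ((List.range d.length).map Int.ofNat) f (pre ++ [i])).map
                    (fun c => runA d (t - (d.getD i []).getD 1 0) 0 c)).map (fun y => 1 + y) := by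
              simp only [List.map_map]
              apply List.map_congr_left
              intro c _
              simp only [Function.comp_apply]
              rw [hget, hrun c, if_pos hc]
            rw [hmaps, foldl_max_one_add_ne_nil _ (by simpa using hPne)
              (by intro y hy; obtain ⟨c, _, rfl⟩ := List.mem_map.mp hy; exact runA_nonneg d c _) b,
              hPeq]
            refine ⟨?_, ?_⟩
            · simp only [hstp]; rw [if_neg hp, if_pos hc]
            · simp only [hstp]; rw [if_neg hp, if_pos hc]; exact le_trans hb (le_max_left _ _)
          · have hmaps :
                (((permsA ((List.range d.length).map Int.ofNat) f (pre ++ [i])).map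
                  (fun nxt => ((List.range d.length).map Int.ofNat).getD i 0 :: nxt)).map
                    (fun c => runA d t 0 c))
                = (permsA ((List.range d.length).map Int.ofNat) f (pre ++ [i])).map
                    (fun _ => (0 : Int)) := by
              simp only [List.map_map]
              apply List.map_congr_left
              intro c _
              simp only [Function.comp_apply]
              rw [hget, hrun c, if_neg hc]
            rw [hmaps, foldl_max_zeros _ b hb]
            refine ⟨?_, ?_⟩
            · simp only [hstp]; rw [if_neg hp, if_neg hc]
            · simp only [hstp]; rw [if_neg hp, if_neg hc]; exact hb
    have hA : ((permsA ((List.range d.length).map Int.ofNat) (f + 1) pre).map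
        (fun c => runA d t 0 c)).foldl max 0 = (List.range d.length).foldl stp 0 := by
      rw [hperm, List.map_flatMap]
      exact foldmax_flatMap_eq _ _ stp hstep 0 le_rfl
    -- B's side folds to the same summary fold
    have hB : dfsB d (f + 1) t
        (((List.range d.length).filter (fun j => decide ¬ j ∈ pre)).map Int.ofNat)
        = (List.range d.length).foldl stp 0 := by
      rw [dfsB, List.foldl_map]
      rw [PySem.List.foldl_congr_mem _ _
        (fun b i => if i ∈ pre then b
          else if (d.getD i []).getD 0 0 ≤ t then
            max b (1 + dfsB d f (t - (d.getD i []).getD 1 0)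
              (((List.range d.length).filter (fun j => decide ¬ j ∈ pre ++ [i])).map Int.ofNat))
          else b) 0 ?_]
      · rw [List.foldl_filter]
        apply PySem.List.foldl_congr_mem
        intro b i _
        by_cases hp : i ∈ pre <;> simp [hp, hstp]
      · intro b i hiav
        have hip : i ∉ pre := by
          have := (List.mem_filter.mp hiav).2; simpa using this
        have hfilt :
            (((List.range d.length).filter (fun j => decide ¬ j ∈ pre)).map Int.ofNat).filter
              (fun j => j ≠ (i : Int))
            = ((List.range d.length).filter (fun j => decide ¬ j ∈ pre ++ [i])).map Int.ofNat := by
          rw [List.filter_map]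
          rw [avail_step]
          congr 1
          apply List.filter_congr
          intro j _
          by_cases hj : j = i <;> simp [Function.comp, hj]
        simp only [Int.ofNat_eq_natCast, Int.toNat_natCast, hfilt, if_neg hip]
    rw [hA, hB]

lemma solution_eq (k : Int) (dungeons : List (List Int)) (h : dungeons ≠ []) :
    solution k dungeons = solution_alt k dungeons := by
  have hn : 0 < dungeons.length := List.length_pos_of_ne_nil h
  have hfil : (List.range dungeons.length).filter (fun j => decide ¬ j ∈ ([] : List Nat))
      = List.range dungeons.length := by simp
  obtain ⟨hne, heq⟩ := main_lemma dungeons dungeons.length [] k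
    (by rw [hfil]; simp) hn
  rw [hfil] at heq
  unfold solution solution_alt
  obtain ⟨c0, cs, hbf⟩ := List.exists_cons_of_ne_nil hne
  rw [hbf] at heq ⊢
  simp only [List.map_cons, List.foldl_cons] at heq ⊢
  rw [PySem.List.max?_id_cons, Option.getD_some]
  rw [show max 0 (runA dungeons k 0 c0) = runA dungeons k 0 c0 from
    max_eq_right (runA_nonneg dungeons c0 k)] at heq
  exact heq

-- ===== VERDICT (by name: the statement is the Claim_ definition above) =====
theorem solution_spec : Claim_equal_solution := by
  intro k dungeons _ hpre
  unfold Spec_solution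
  exact solution_eq k dungeons hpre.1
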